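-- pv_equiv track=rewrite | github.com/liuslnlp/CoupletAI | cal_max_len.py | cal_total_max_len
-- ===== SOURCE A (Python) =====
-- from typing import List
--
-- def cal_max_seq_len(seqs: List[List[str]]) -> int:
--     """Calculate the max length of a group of sequence.
--     """
--     cur_max_len = 0
--     for seq in seqs:
--         if len(seq) > cur_max_len:
--             cur_max_len = len(seq)
--     return cur_max_len
--
-- def cal_total_max_len(seqss: List[List[List[str]]]) -> int:
--     """Calculate the max_seq_len in both train dataset and test dataset.
--     """
--     cur_max_len = 0
--     cur_len = 0
--     for seqs in seqss:
--         cur_len = cal_max_seq_len(seqs)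
--         if cur_len > cur_max_len:
--             cur_max_len = cur_len
--     return cur_max_len
-- ===== SOURCE B (Python) =====
-- from typing import List
--
-- def cal_total_max_len(seqss: List[List[List[str]]]) -> int:
--     """Sort all sequence lengths ascending; the answer is the last one (0 if none).
--
--     Correct because the last element of an ascending sort is the maximum,
--     which is exactly the max-of-maxes A computes.
--     """
--     lengths = sorted(len(seq) for seqs in seqss for seq in seqs)
--     return lengths[-1] if lengths else 0
-- ===== Notes on version B (the rewrite author's own statement) =====
-- stated objective: alternative
-- what changed: Replaces A's two nested running-maximum accumulator loops (helper max per group, then max of those) with a sort-based selection: collect all sequence lengths, sort them ascending, and return the last element (0 if there are none).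
import Mathlib
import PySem

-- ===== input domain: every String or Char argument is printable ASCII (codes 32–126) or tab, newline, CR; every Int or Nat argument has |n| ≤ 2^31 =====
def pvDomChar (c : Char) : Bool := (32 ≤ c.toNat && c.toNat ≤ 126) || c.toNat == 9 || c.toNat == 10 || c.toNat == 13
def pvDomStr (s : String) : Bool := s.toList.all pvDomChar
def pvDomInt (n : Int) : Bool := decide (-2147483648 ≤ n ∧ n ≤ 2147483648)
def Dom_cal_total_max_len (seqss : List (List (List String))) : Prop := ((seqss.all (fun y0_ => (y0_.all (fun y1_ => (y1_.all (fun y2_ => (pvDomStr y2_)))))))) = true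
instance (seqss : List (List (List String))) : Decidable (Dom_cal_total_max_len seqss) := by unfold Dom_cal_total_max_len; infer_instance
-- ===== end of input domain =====

-- B replaces A's nested running-maximum loops by sorting all sequence lengths and taking the last (alternative decomposition).

-- ===== PORT A =====
-- helper cal_max_seq_len: loop keeping the running maximum length of one group
def cal_max_seq_len (seqs : List (List String)) : Int :=
  seqs.foldl (fun cur_max_len seq =>
    if (seq.length : Int) > cur_max_len then (seq.length : Int) else cur_max_len) 0

def cal_total_max_len (seqss : List (List (List String))) : Int :=
  seqss.foldl (fun cur_max_len seqs =>
    let cur_len := cal_max_seq_len seqs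
    if cur_len > cur_max_len then cur_len else cur_max_len) 0

-- ===== PORT B =====
-- lengths = sorted(len(seq) for seqs in seqss for seq in seqs); return lengths[-1] if lengths else 0
def cal_total_max_len_alt (seqss : List (List (List String))) : Int :=
  let lengths := PySem.List.sorted ((seqss.flatMap (fun seqs => seqs)).map
    (fun seq => (seq.length : Int))) (fun x => x) false
  if lengths.isEmpty then 0 else lengths.getLastD 0

-- ===== PRECONDITION & SPEC =====
def Spec_cal_total_max_len (seqss : List (List (List String))) (out : Int) : Prop := out = cal_total_max_len_alt seqss
instance (seqss : List (List (List String))) (out : Int) : Decidable (Spec_cal_total_max_len seqss out) := by unfold Spec_cal_total_max_len; infer_instance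

-- ===== CLAIM (what is proved, stated in full; the proofs are below) =====
def Claim_equal_cal_total_max_len : Prop := ∀ (seqss : List (List (List String))), Dom_cal_total_max_len seqss → Spec_cal_total_max_len seqss (cal_total_max_len seqss)

-- ===== LEMMAS AND PROOFS =====

-- "if x > m then x else m" is max
theorem pv_if_gt_eq_max (x m : Int) : (if x > m then x else m) = max m x := by
  simp [max_def]; omega

-- A's inner helper, started from an arbitrary accumulator, is a foldl of max over lengths
theorem pv_inner_fold (seqs : List (List String)) (a : Int) :
    seqs.foldl (fun cur seq => if (seq.length : Int) > cur then (seq.length : Int) else cur) a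
      = (seqs.map (fun seq => (seq.length : Int))).foldl max a := by
  induction seqs generalizing a with
  | nil => rfl
  | cons s t ih => simp [List.foldl, pv_if_gt_eq_max, List.foldl_map]

-- pulling an element into the start of a max-fold
theorem pv_foldl_max (L : List Int) : ∀ a b : Int, max a (L.foldl max b) = L.foldl max (max a b) := by
  induction L with
  | nil => intro a b; rfl
  | cons x t ih => intro a b; simp only [List.foldl]; rw [ih, max_assoc]

-- A's outer loop is a foldl of max over the flattened lengths
theorem pv_A_fold_flatten (seqss : List (List (List String))) (a : Int) (ha : 0 ≤ a) :
    seqss.foldl (fun cur seqs =>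
        let cur_len := cal_max_seq_len seqs
        if cur_len > cur then cur_len else cur) a
      = ((seqss.flatMap (fun seqs => seqs)).map (fun seq => (seq.length : Int))).foldl max a := by
  induction seqss generalizing a with
  | nil => rfl
  | cons g t ih =>
    simp only [List.foldl, List.flatMap_cons, List.map_append, List.foldl_append]
    rw [pv_if_gt_eq_max, ih _ (le_trans ha (le_max_left _ _))]
    congr 1
    rw [cal_max_seq_len, pv_inner_fold, pv_foldl_max]
    congr 1
    omega

-- a max-fold is invariant under permutation
theorem pv_foldl_max_perm {L M : List Int} (h : L.Perm M) (a : Int) :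
    L.foldl max a = M.foldl max a := by
  induction h generalizing a with
  | nil => rfl
  | cons x _ ih => simp only [List.foldl]; exact ih _
  | swap x y l =>
    simp only [List.foldl]
    rw [max_assoc, max_comm y x, ← max_assoc]
  | trans _ _ ih1 ih2 => rw [ih1, ih2]

-- getLastD of a nonempty list is a member and ignores the default
theorem pv_getLastD_mem {α : Type} (y : α) (u : List α) (d : α) : (y :: u).getLastD d ∈ y :: u := by
  have h : (y :: u) ≠ [] := by simp
  simp only [List.getLastD_eq_getLast?, List.getLast?_eq_some_getLast h, Option.getD_some]
  exact List.getLast_mem h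

theorem pv_getLastD_irrel {α : Type} (y : α) (u : List α) (a b : α) :
    (y :: u).getLastD a = (y :: u).getLastD b := by
  have h : (y :: u) ≠ [] := by simp
  simp only [List.getLastD_eq_getLast?, List.getLast?_eq_some_getLast h, Option.getD_some]

-- on an ascending list the max-fold is the last element
theorem pv_foldl_max_sorted (M : List Int) (hs : M.Pairwise (· ≤ ·)) :
    ∀ a : Int, M.foldl max a = max a (M.getLastD a) := by
  induction M with
  | nil => intro a; simp
  | cons x t ih =>
    intro a
    rcases List.pairwise_cons.mp hs with ⟨hx, ht⟩
    simp only [List.foldl, List.getLastD_cons]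
    rw [ih ht (max a x)]
    cases t with
    | nil => simp
    | cons y u =>
      have hxle : x ≤ (y :: u).getLastD x := hx _ (pv_getLastD_mem y u x)
      rw [pv_getLastD_irrel y u (max a x) x]
      omega

-- every flattened length is nonnegative
theorem pv_lengths_nonneg (seqss : List (List (List String))) :
    ∀ x ∈ (seqss.flatMap (fun seqs => seqs)).map (fun seq => (seq.length : Int)), 0 ≤ x := by
  intro x hx
  rcases List.mem_map.mp hx with ⟨s, _, rfl⟩
  exact Int.natCast_nonneg _

-- ===== VERDICT (by name: the statement is the Claim_ definition above) =====
theorem cal_total_max_len_spec : Claim_equal_cal_total_max_len := by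
  intro seqss _
  unfold Spec_cal_total_max_len cal_total_max_len cal_total_max_len_alt
  set L := (seqss.flatMap (fun seqs => seqs)).map (fun seq => (seq.length : Int)) with hL
  set M := PySem.List.sorted L (fun x => x) false with hM
  have hperm : L.Perm M := (PySem.List.sorted_perm (xs := L) (key := fun x => x) (rev := false)).symm
  have hpair : M.Pairwise (· ≤ ·) := PySem.List.sorted_pairwise (xs := L) (key := fun x => x)
  rw [pv_A_fold_flatten seqss 0 le_rfl, ← hL, pv_foldl_max_perm hperm, pv_foldl_max_sorted M hpair 0]
  cases hMe : M with
  | nil => simp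
  | cons y u =>
    have hmemM : (y :: u).getLastD 0 ∈ L :=
      hperm.mem_iff.mpr (hMe ▸ pv_getLastD_mem y u 0)
    have h0 : 0 ≤ (y :: u).getLastD 0 := pv_lengths_nonneg seqss _ hmemM
    simp only [List.isEmpty_cons, if_neg (by simp : ¬ (false = true))]
    omega
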